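-- pv_equiv track=rewrite | github.com/Kanhaiya2206/GitLearningRepo | convert.py | caladdedvalue
-- ===== SOURCE A (Python) =====
-- def caladdedvalue(num):
--     result=0
--     decimalplace=1
--     if(num==0):
--         result+=(5*decimalplace)
--     while(num>0):
--         if(num%10==0):
--             result+=(5*decimalplace)
--         num//=10
--         decimalplace*=10
--     return result
-- ===== SOURCE B (Python) =====
-- def caladdedvalue(num):
--     if num < 0:
--         return 0
--     return sum(5 * 10 ** i for i, c in enumerate(reversed(str(num))) if c == '0')
-- ===== Notes on version B (the rewrite author's own statement) =====
-- stated objective: simpler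
-- what changed: B replaces A's arithmetic digit-peeling loop with explicit result/decimalplace accumulators by a one-line sum comprehension over the decimal string, where each zero character contributes five times the power of ten given by its reversed position.
import Mathlib
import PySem

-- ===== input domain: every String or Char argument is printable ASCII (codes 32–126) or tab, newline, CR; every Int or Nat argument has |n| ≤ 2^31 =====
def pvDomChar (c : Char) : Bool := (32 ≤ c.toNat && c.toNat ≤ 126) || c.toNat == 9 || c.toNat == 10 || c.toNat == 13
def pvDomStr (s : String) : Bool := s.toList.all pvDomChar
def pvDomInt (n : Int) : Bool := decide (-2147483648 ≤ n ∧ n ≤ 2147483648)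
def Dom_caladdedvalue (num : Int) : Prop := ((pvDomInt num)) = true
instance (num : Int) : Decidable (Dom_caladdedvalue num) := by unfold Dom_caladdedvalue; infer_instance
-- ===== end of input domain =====

-- B replaces A's digit-peeling while-loop (result/decimalplace accumulators) by a sum over the characters of str(num); equal values, objective: simpler.


-- ===== PORT A =====
-- the while loop of A, state (num, result, decimalplace)
def caladdedvalueLoop (num result decimalplace : Int) : Int :=
  if num > 0 then
    caladdedvalueLoop (PySem.Int.floordiv num 10)
      (if PySem.Int.mod num 10 = 0 then result + 5 * decimalplace else result)
      (decimalplace * 10)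
  else result
termination_by num.toNat
decreasing_by
  rw [PySem.Int.floordiv_eq_ediv_of_pos (by omega : (0:Int) < 10)]
  omega

def caladdedvalue (num : Int) : Int :=
  let result : Int := 0
  let decimalplace : Int := 1
  let result := if num = 0 then result + 5 * decimalplace else result
  caladdedvalueLoop num result decimalplace

-- ===== PORT B =====
-- the comprehension index i of enumerate is ≥ 0, so Python's 10 ** i is exactly 10 ^ i.toNat here
def caladdedvalue_alt (num : Int) : Int :=
  if num < 0 then 0
  else ((((PySem.List.enumerate (PySem.Int.toChars num).reverse 0).filter
      (fun p => p.2 == '0')).map (fun p => (5 : Int) * 10 ^ p.1.toNat)).sum)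

-- ===== PRECONDITION & SPEC =====
def Spec_caladdedvalue (num : Int) (out : Int) : Prop := out = caladdedvalue_alt num
instance (num : Int) (out : Int) : Decidable (Spec_caladdedvalue num out) := by unfold Spec_caladdedvalue; infer_instance

-- ===== CLAIM (what is proved, stated in full; the proofs are below) =====
def Claim_equal_caladdedvalue : Prop := ∀ (num : Int), Dom_caladdedvalue num → Spec_caladdedvalue num (caladdedvalue num)

-- ===== LEMMAS AND PROOFS =====

-- B's sum as a function of the character list and the enumerate start index
def Sfun (cs : List Char) (k : Int) : Int :=
  (((PySem.List.enumerate cs k).filter (fun p => p.2 == '0')).map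
    (fun p => (5 : Int) * 10 ^ p.1.toNat)).sum

lemma Sfun_nil (k : Int) : Sfun [] k = 0 := by simp [Sfun, PySem.List.enumerate_nil]

lemma Sfun_cons (c : Char) (t : List Char) (k : Nat) :
    Sfun (c :: t) (k : Int) = (if c == '0' then (5:Int) * 10 ^ k else 0) + Sfun t ((k + 1 : Nat) : Int) := by
  have e1 : ((k : Int) + 1) = ((k + 1 : Nat) : Int) := by push_cast; ring
  simp only [Sfun, PySem.List.enumerate_cons, List.filter_cons, e1]
  by_cases hc : (c == '0') = true
  · simp [hc]
  · simp [hc]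

lemma Sfun_shift (cs : List Char) : ∀ (k : Nat), Sfun cs ((k + 1 : Nat) : Int) = 10 * Sfun cs (k : Int) := by
  induction cs with
  | nil => intro k; simp [Sfun_nil]
  | cons c t ih =>
    intro k
    rw [Sfun_cons c t (k+1), Sfun_cons c t k, ih (k+1)]
    by_cases hc : (c == '0') = true
    · simp [hc]; ring
    · simp [hc]

lemma toDigitsCore_app (b : Nat) :
    ∀ (f n : Nat) (ds : List Char),
      Nat.toDigitsCore b f n ds = Nat.toDigitsCore b f n [] ++ ds := by
  intro f
  induction f with
  | zero => intro n ds; simp [Nat.toDigitsCore]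
  | succ f ih =>
    intro n ds
    simp only [Nat.toDigitsCore]
    by_cases h : n / b = 0
    · simp [h]
    · simp only [h, ite_false]
      rw [ih (n / b) ((n % b).digitChar :: ds), ih (n / b) [(n % b).digitChar]]
      simp

lemma toDigitsCore_fuel (b : Nat) (hb : 2 ≤ b) :
    ∀ (f n : Nat) (ds : List Char), n < f →
      Nat.toDigitsCore b f n ds = Nat.toDigitsCore b (n + 1) n ds := by
  intro f
  induction f using Nat.strong_induction_on with
  | _ f ih =>
    intro n ds hnf
    match f, hnf with
    | f + 1, hnf =>
      simp only [Nat.toDigitsCore]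
      by_cases h : n / b = 0
      · simp [h]
      · simp only [h, ite_false]
        have hn : 0 < n := by
          rcases Nat.eq_zero_or_pos n with h0 | h0
          · exfalso; exact h (by simp [h0])
          · exact h0
        have hdiv : n / b < n := Nat.div_lt_self hn (by omega)
        rw [ih f (by omega) (n / b) _ (by omega),
            ih n (by omega) (n / b) _ (by omega)]

lemma toDigits_step (m : Nat) (h : 10 ≤ m) :
    Nat.toDigits 10 m = Nat.toDigits 10 (m / 10) ++ [Nat.digitChar (m % 10)] := by
  have hm0 : ¬ m / 10 = 0 := by omega
  have step : Nat.toDigitsCore 10 (m + 1) m [] =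
      Nat.toDigitsCore 10 m (m / 10) [(m % 10).digitChar] := by
    simp only [Nat.toDigitsCore, hm0, ite_false]
  calc Nat.toDigits 10 m = Nat.toDigitsCore 10 (m + 1) m [] := rfl
    _ = Nat.toDigitsCore 10 m (m / 10) [(m % 10).digitChar] := step
    _ = Nat.toDigitsCore 10 m (m / 10) [] ++ [(m % 10).digitChar] :=
        toDigitsCore_app 10 m (m / 10) _
    _ = Nat.toDigitsCore 10 (m / 10 + 1) (m / 10) [] ++ [(m % 10).digitChar] := by
        rw [toDigitsCore_fuel 10 (by omega) m (m / 10) [] (by omega)]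
    _ = Nat.toDigits 10 (m / 10) ++ [(m % 10).digitChar] := rfl

-- A's loop value: 5 per zero digit of m, weighted by its place value
def Zfun (m : Nat) : Int :=
  if m = 0 then 0 else (if m % 10 = 0 then 5 else 0) + 10 * Zfun (m / 10)
termination_by m
decreasing_by exact Nat.div_lt_self (by omega) (by omega)

lemma digitChar_beq_zero (d : Nat) (hd : d < 10) : (Nat.digitChar d == '0') = decide (d = 0) := by
  interval_cases d <;> decide

lemma toDigits_small (m : Nat) (h : m < 10) : Nat.toDigits 10 m = [Nat.digitChar m] := by
  interval_cases m <;> decide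

lemma S_toDigits (m : Nat) (hm : 0 < m) : Sfun ((Nat.toDigits 10 m).reverse) 0 = Zfun m := by
  induction m using Nat.strong_induction_on with
  | _ m ih =>
    by_cases hs : m < 10
    · rw [toDigits_small m hs]
      have h1 : Sfun [Nat.digitChar m] 0 =
          (if Nat.digitChar m == '0' then (5:Int) * 10 ^ (0:Nat) else 0) + Sfun [] 1 := by
        exact_mod_cast Sfun_cons (Nat.digitChar m) [] 0
      simp only [List.reverse_singleton, h1, Sfun_nil, digitChar_beq_zero m hs]
      rw [Zfun]
      have : ¬ m = 0 := by omega
      simp [this, Nat.mod_eq_of_lt hs, Nat.div_eq_of_lt hs, Zfun]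
    · have h10 : 10 ≤ m := by omega
      rw [toDigits_step m h10]
      simp only [List.reverse_append, List.reverse_singleton, List.singleton_append]
      have hc : Sfun ((m % 10).digitChar :: (Nat.toDigits 10 (m / 10)).reverse) 0 =
          (if (m % 10).digitChar == '0' then (5:Int) * 10 ^ (0:Nat) else 0) +
            Sfun ((Nat.toDigits 10 (m / 10)).reverse) 1 := by
        exact_mod_cast Sfun_cons ((m % 10).digitChar) _ 0
      have hshift : Sfun ((Nat.toDigits 10 (m / 10)).reverse) ((1:Nat) : Int) =
          10 * Sfun ((Nat.toDigits 10 (m / 10)).reverse) ((0:Nat) : Int) :=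
        Sfun_shift _ 0
      have hrec := ih (m / 10) (Nat.div_lt_self (by omega) (by omega)) (by omega)
      rw [hc]
      rw [show ((1:Int) = ((1:Nat):Int)) from rfl, hshift]
      rw [digitChar_beq_zero (m % 10) (Nat.mod_lt m (by omega))]
      rw [show (((0:Nat):Int) = (0:Int)) from rfl, hrec]
      have hm0 : ¬ m = 0 := by omega
      conv_rhs => rw [Zfun]
      by_cases hz : m % 10 = 0 <;> simp [hm0, hz]

lemma loopA_eq (m : Nat) : ∀ r d : Int, caladdedvalueLoop (m : Int) r d = r + d * Zfun m := by
  induction m using Nat.strong_induction_on with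
  | _ m ih =>
    intro r d
    by_cases hm : m = 0
    · subst hm
      rw [caladdedvalueLoop, Zfun]
      simp
    · have hpos : (0:Int) < (m:Int) := by exact_mod_cast Nat.pos_of_ne_zero hm
      rw [caladdedvalueLoop]
      simp only [hpos, if_pos]
      rw [show PySem.Int.floordiv (m:Int) 10 = ((m / 10 : Nat) : Int) from
            by exact_mod_cast PySem.Int.floordiv_natCast m 10,
          show PySem.Int.mod (m:Int) 10 = ((m % 10 : Nat) : Int) from
            by exact_mod_cast PySem.Int.mod_natCast m 10]
      rw [ih (m / 10) (Nat.div_lt_self (Nat.pos_of_ne_zero hm) (by omega))]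
      conv_rhs => rw [Zfun]
      by_cases hz : m % 10 = 0
      · simp [hz, hm]; ring
      · rw [if_neg (by omega)]
        simp [hm, hz]; ring

-- ===== VERDICT (by name: the statement is the Claim_ definition above) =====
theorem caladdedvalue_spec : Claim_equal_caladdedvalue := by
  intro num _
  unfold Spec_caladdedvalue
  rcases lt_trichotomy num 0 with hneg | hzero | hpos
  · have hne : ¬ num = 0 := by omega
    simp only [caladdedvalue, hne, ite_false, caladdedvalue_alt, hneg, ite_true]
    rw [caladdedvalueLoop]
    simp [show ¬ num > 0 by omega]
  · subst hzero
    have hA : caladdedvalue 0 = 5 := by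
      simp only [caladdedvalue, ite_true]
      rw [caladdedvalueLoop]; norm_num
    rw [hA]
    decide
  · have hm : num = ((num.toNat : Nat) : Int) := by omega
    have hmpos : 0 < num.toNat := by omega
    have hne : ¬ num = 0 := by omega
    have hnotneg : ¬ num < 0 := by omega
    have hB : caladdedvalue_alt num = Sfun ((Nat.toDigits 10 num.toNat).reverse) 0 := by
      simp only [caladdedvalue_alt, hnotneg, ite_false, Sfun]
      have : PySem.Int.toChars num = Nat.toDigits 10 num.toNat := by
        simp [PySem.Int.toChars, hnotneg]
      rw [this]
    rw [hB, S_toDigits num.toNat hmpos]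
    simp only [caladdedvalue, hne, ite_false]
    rw [hm, loopA_eq num.toNat, Int.toNat_natCast]
    ring
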